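-- pv_equiv track=rewrite | github.com/samcheyette/CSP-model | special_constraints/nurikabe_constraints.py | get_canonical_form
-- ===== SOURCE A (Python) =====
-- def get_canonical_form(poly):
--     """
--     Get the canonical representation of a polyomino.
--
--     Args:
--         poly: A frozenset of (x, y) coordinates
--
--     Returns:
--         The canonical form as a frozenset
--     """
--     min_representation = None
--
--     # Define the 8 transformations (4 rotations × 2 reflections)
--     transformations = [
--         lambda x, y: (x, y),               # Identity
--         lambda x, y: (-y, x),              # 90° clockwise
--         lambda x, y: (-x, -y),             # 180°
--         lambda x, y: (y, -x),              # 270° clockwise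
--         lambda x, y: (-x, y),              # Reflect across y-axis
--         lambda x, y: (y, x),               # Reflect across y=x
--         lambda x, y: (x, -y),              # Reflect across x-axis
--         lambda x, y: (-y, -x)              # Reflect across y=-x
--     ]
--
--     # Find the minimum representation
--     for transform in transformations:
--         # Apply transformation
--         transformed = [transform(x, y) for x, y in poly]
--
--         # Normalize to origin
--         min_x = min(x for x, y in transformed)
--         min_y = min(y for x, y in transformed)
--         normalized = frozenset((x - min_x, y - min_y) for x, y in transformed)
--
--         # Update the minimum representation
--         if min_representation is None or normalized < min_representation:
--             min_representation = normalized
--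
--     return min_representation
-- ===== SOURCE B (Python) =====
-- def get_canonical_form(poly):
--     # A's frozenset "<" test is PROPER subset; every candidate has the same
--     # cardinality (all 8 transforms are bijections), so the comparison never
--     # fires and the result is always the identity transform's normalization:
--     # poly translated so its minimum x and y become 0.
--     min_x = min(x for x, y in poly)
--     min_y = min(y for x, y in poly)
--     return frozenset((x - min_x, y - min_y) for x, y in poly)
-- ===== Notes on version B (the rewrite author's own statement) =====
-- stated objective: simpler
-- what changed: B drops A's 8-transformation loop and subset comparison entirely: since frozenset '<' is proper subset and all 8 normalized candidates have the same cardinality, the comparison can never fire, so the result is always the identity transform's origin-normalized set, which B computes in one pass.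
import Mathlib
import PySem

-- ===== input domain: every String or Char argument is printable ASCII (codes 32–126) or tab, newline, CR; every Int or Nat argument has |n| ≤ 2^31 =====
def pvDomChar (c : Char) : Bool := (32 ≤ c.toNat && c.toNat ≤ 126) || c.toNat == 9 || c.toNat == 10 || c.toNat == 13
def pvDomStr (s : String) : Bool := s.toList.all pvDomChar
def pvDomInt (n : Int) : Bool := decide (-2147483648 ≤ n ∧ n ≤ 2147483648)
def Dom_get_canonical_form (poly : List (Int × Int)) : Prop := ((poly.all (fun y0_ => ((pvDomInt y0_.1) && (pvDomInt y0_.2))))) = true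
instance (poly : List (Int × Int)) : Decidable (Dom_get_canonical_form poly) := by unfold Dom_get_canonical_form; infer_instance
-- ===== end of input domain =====

-- B replaces A's 8-transformation loop (whose proper-subset comparison can never fire,
-- all candidates having equal cardinality) with a single origin-normalization pass: simpler.


-- ===== PORT A =====
-- the 8 transformations (4 rotations × 2 reflections), in A's order
def gcfTransforms : List (Int × Int → Int × Int) :=
  [fun p => (p.1, p.2),
   fun p => (-p.2, p.1),
   fun p => (-p.1, -p.2),
   fun p => (p.2, -p.1),
   fun p => (-p.1, p.2),
   fun p => (p.2, p.1),
   fun p => (p.1, -p.2),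
   fun p => (-p.2, -p.1)]

-- one iteration of A's loop body; min? … |>.getD 0 is min(...) (total form: the
-- default is unreachable under Pre_, where poly ≠ [])
def gcfStep (poly : List (Int × Int)) (mr : Option (List (Int × Int)))
    (t : Int × Int → Int × Int) : Option (List (Int × Int)) :=
  let transformed := poly.map t
  let min_x := (PySem.List.min? (transformed.map Prod.fst) (fun v => v)).getD 0
  let min_y := (PySem.List.min? (transformed.map Prod.snd) (fun v => v)).getD 0
  let normalized := PySem.Set.ofList (transformed.map (fun p => (p.1 - min_x, p.2 - min_y)))
  match mr with
  | none => some normalized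
  | some m =>
      -- Python's 'normalized < m' on frozensets: proper subset
      if PySem.Set.issubset normalized m && !(PySem.Set.equal normalized m) then
        some normalized
      else
        some m

def get_canonical_form (poly : List (Int × Int)) : List (Int × Int) :=
  (gcfTransforms.foldl (gcfStep poly) none).getD []

-- ===== PORT B =====
def get_canonical_form_alt (poly : List (Int × Int)) : List (Int × Int) :=
  let min_x := (PySem.List.min? (poly.map Prod.fst) (fun v => v)).getD 0
  let min_y := (PySem.List.min? (poly.map Prod.snd) (fun v => v)).getD 0
  PySem.Set.ofList (poly.map (fun p => (p.1 - min_x, p.2 - min_y)))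

-- ===== PRECONDITION & SPEC =====
-- Pre_ excludes only the empty set, on which Python's min() raises ValueError (in both A and B).
def Pre_get_canonical_form (poly : List (Int × Int)) : Prop := poly ≠ []
instance (poly : List (Int × Int)) : Decidable (Pre_get_canonical_form poly) := by
  unfold Pre_get_canonical_form; infer_instance
def pvWitness_get_canonical_form : (List (Int × Int)) := [(0, 0), (1, 0)]

def Spec_get_canonical_form (poly : List (Int × Int)) (out : List (Int × Int)) : Prop :=
  out = get_canonical_form_alt poly
instance (poly : List (Int × Int)) (out : List (Int × Int)) :
    Decidable (Spec_get_canonical_form poly out) := by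
  unfold Spec_get_canonical_form; infer_instance

-- ===== CLAIM (what is proved, stated in full; the proofs are below) =====
def Claim_equal_get_canonical_form : Prop :=
  ∀ (poly : List (Int × Int)), Dom_get_canonical_form poly →
    Pre_get_canonical_form poly →
      Spec_get_canonical_form poly (get_canonical_form poly)

-- ===== LEMMAS AND PROOFS =====

-- |set(map f l)| = |set(l)| for injective f
lemma gcf_len_ofList (l : List (Int × Int)) (f : Int × Int → Int × Int)
    (hf : Function.Injective f) :
    (PySem.Set.ofList (l.map f)).length = (PySem.Set.ofList l).length := by
  have h1 : ∀ (xs : List (Int × Int)), (PySem.Set.ofList xs).length = xs.toFinset.card := by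
    intro xs
    rw [← List.toFinset_card_of_nodup (PySem.Set.nodup_ofList xs)]
    congr 1
    ext x
    simp [PySem.Set.mem_ofList]
  have h2 : (l.map f).toFinset = l.toFinset.image f := by ext x; simp
  rw [h1, h1, h2, Finset.card_image_of_injective _ hf]

-- equal-cardinality nodup lists: a proper-subset test is always false
lemma gcf_cond_false (n m : List (Int × Int)) (hn : n.Nodup) (hm : m.Nodup)
    (hlen : n.length = m.length) :
    (PySem.Set.issubset n m && !(PySem.Set.equal n m)) = false := by
  by_cases h : PySem.Set.issubset n m = true
  · have hsub : ∀ x ∈ n, x ∈ m := (PySem.Set.issubset_iff n m).mp h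
    have hfin : n.toFinset = m.toFinset := by
      apply Finset.eq_of_subset_of_card_le
      · intro x hx
        rw [List.mem_toFinset] at hx ⊢
        exact hsub x hx
      · rw [List.toFinset_card_of_nodup hm, List.toFinset_card_of_nodup hn, hlen]
    have heq : PySem.Set.equal n m = true := by
      rw [PySem.Set.equal_iff]
      intro x
      rw [← List.mem_toFinset, ← List.mem_toFinset, hfin]
    simp [h, heq]
  · simp only [Bool.and_eq_false_iff]
    left
    exact Bool.eq_false_iff.mpr h

lemma gcf_alt_nodup (poly : List (Int × Int)) : (get_canonical_form_alt poly).Nodup := by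
  unfold get_canonical_form_alt
  exact PySem.Set.nodup_ofList _

lemma gcf_alt_len (poly : List (Int × Int)) :
    (get_canonical_form_alt poly).length = (PySem.Set.ofList poly).length := by
  unfold get_canonical_form_alt
  apply gcf_len_ofList
  intro a b h
  simp only [Prod.ext_iff] at h ⊢
  omega

lemma gcf_shift_inj (c d : Int) :
    Function.Injective (fun p : Int × Int => (p.1 - c, p.2 - d)) := by
  intro a b h
  simp only [Prod.ext_iff] at h ⊢
  omega

-- once the accumulator is B's result, every further transform is skipped
lemma gcf_step_skip (poly : List (Int × Int)) (t : Int × Int → Int × Int)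
    (ht : Function.Injective t) :
    gcfStep poly (some (get_canonical_form_alt poly)) t = some (get_canonical_form_alt poly) := by
  simp only [gcfStep, List.map_map]
  generalize (PySem.List.min? (List.map (Prod.fst ∘ t) poly) fun v => v).getD 0 = c
  generalize (PySem.List.min? (List.map (Prod.snd ∘ t) poly) fun v => v).getD 0 = d
  have hinj : Function.Injective ((fun p : Int × Int => (p.1 - c, p.2 - d)) ∘ t) :=
    (gcf_shift_inj c d).comp ht
  have hlen :
      (PySem.Set.ofList (poly.map ((fun p : Int × Int => (p.1 - c, p.2 - d)) ∘ t))).length =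
        (get_canonical_form_alt poly).length := by
    rw [gcf_len_ofList _ _ hinj, gcf_alt_len]
  have hc := gcf_cond_false _ _ (PySem.Set.nodup_ofList _) (gcf_alt_nodup poly) hlen
  simp [hc]

lemma gcf_first_step (poly : List (Int × Int)) :
    gcfStep poly none (fun p => (p.1, p.2)) = some (get_canonical_form_alt poly) := by
  have hmap : poly.map (fun p : Int × Int => (p.1, p.2)) = poly := by simp
  simp only [gcfStep, get_canonical_form_alt, hmap]

-- ===== VERDICT (by name: the statement is the Claim_ definition above) =====
theorem get_canonical_form_spec : Claim_equal_get_canonical_form := by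
  intro poly _ _
  unfold Spec_get_canonical_form get_canonical_form gcfTransforms
  simp only [List.foldl_cons, List.foldl_nil]
  rw [gcf_first_step,
    gcf_step_skip poly _ (by intro a b h; simp [Prod.ext_iff] at h ⊢; omega),
    gcf_step_skip poly _ (by intro a b h; simp [Prod.ext_iff] at h ⊢; omega),
    gcf_step_skip poly _ (by intro a b h; simp [Prod.ext_iff] at h ⊢; omega),
    gcf_step_skip poly _ (by intro a b h; simp [Prod.ext_iff] at h ⊢; omega),
    gcf_step_skip poly _ (by intro a b h; simp [Prod.ext_iff] at h ⊢; omega),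
    gcf_step_skip poly _ (by intro a b h; simp [Prod.ext_iff] at h ⊢; omega),
    gcf_step_skip poly _ (by intro a b h; simp [Prod.ext_iff] at h ⊢; omega)]
  rfl
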